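-- pv_equiv track=rewrite | github.com/shooting12/Leetcode | 1.2_CheckPermutation.py | isPermutation_hint
-- ===== SOURCE A (Python) =====
-- def isPermutation_hint(str1, str2):
--     ''' Use dictionary & Add chars count in 1st string + minus chars count in 2nd string: O(n)/O(c) '''
--     l1 = len(str1)
--     l2 = len(str2)
--
--     if l1 != l2:
--         return False
--
--     strDict = dict()
--
--     # Put 1st string's all characters in dictionary (~hashtable)
--     for c in str1:
--         c = c.lower()
--         count = strDict.get(c, 0)
--         count += 1
--         pair = {c : count}
--         strDict.update(pair)
--
--     # Minus dictionary by 2nd string's chars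
--     for c in str2:
--         c = c.lower()
--         count = strDict.get(c, 0)
--         count -= 1
--
--         if count < 0:
--             return False
--
--         pair = {c : count}
--         strDict.update(pair)
--
--     # Check whether all the char count in dictionary is zero (should be)
--     for key, value in strDict.items():
--         if value != 0:
--             return False
--
--     return True
-- ===== SOURCE B (Python) =====
-- def isPermutation_hint(str1, str2):
--     ''' Sort the lowercased characters of both strings and compare. '''
--     return sorted(str1.lower()) == sorted(str2.lower())
-- ===== Notes on version B (the rewrite author's own statement) =====
-- stated objective: simpler
-- what changed: Replaced the three-pass dictionary counting (count up on str1, count down on str2 with an early exit, then scan the dict for non-zero counts) by a one-line sort-and-compare of the lowercased character sequences.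
import Mathlib
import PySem

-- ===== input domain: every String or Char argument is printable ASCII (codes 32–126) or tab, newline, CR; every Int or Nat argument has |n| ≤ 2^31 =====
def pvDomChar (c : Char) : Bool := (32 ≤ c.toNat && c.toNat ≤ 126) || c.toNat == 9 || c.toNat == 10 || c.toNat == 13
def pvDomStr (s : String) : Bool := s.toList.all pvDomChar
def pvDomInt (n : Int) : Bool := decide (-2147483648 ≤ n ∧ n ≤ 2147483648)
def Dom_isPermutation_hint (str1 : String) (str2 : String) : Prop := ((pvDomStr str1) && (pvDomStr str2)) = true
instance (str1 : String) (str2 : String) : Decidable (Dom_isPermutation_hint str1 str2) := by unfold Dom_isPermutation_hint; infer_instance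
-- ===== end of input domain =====

-- B replaces A's three-pass dictionary counting with a sort-and-compare of the lowercased characters (simpler, not claimed faster).


-- ===== PORT A =====
-- A's second loop: subtract str2's chars, returning early (none = 'return False') when a count goes negative.
def pyMinusLoop : List Char → PySem.Dict Char Int → Option (PySem.Dict Char Int)
  | [], d => some d
  | c :: rest, d =>
      if d.getD (PySem.Chars.lowerChar c) 0 - 1 < 0 then none
      else pyMinusLoop rest (d.insert (PySem.Chars.lowerChar c) (d.getD (PySem.Chars.lowerChar c) 0 - 1))

def isPermutation_hint (str1 : String) (str2 : String) : Bool :=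
  if PySem.Str.len str1 ≠ PySem.Str.len str2 then false
  else
    -- first loop counts str1's lowercased chars in a dict; the second loop (early return False)
    -- and then the third loop (every remaining count must be zero) follow
    match pyMinusLoop str2.toList
      (str1.toList.foldl
        (fun d c => d.insert (PySem.Chars.lowerChar c) (d.getD (PySem.Chars.lowerChar c) 0 + 1))
        (PySem.Dict.empty : PySem.Dict Char Int)) with
    | none => false
    | some d => d.items.all (fun kv => kv.2 == 0)

-- ===== PORT B =====
def isPermutation_hint_alt (str1 : String) (str2 : String) : Bool :=
  decide (PySem.List.sorted (PySem.Str.lower str1).toList (fun c => c) false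
        = PySem.List.sorted (PySem.Str.lower str2).toList (fun c => c) false)

-- ===== PRECONDITION & SPEC =====
def Spec_isPermutation_hint (str1 : String) (str2 : String) (out : Bool) : Prop := out = isPermutation_hint_alt str1 str2
instance (str1 : String) (str2 : String) (out : Bool) : Decidable (Spec_isPermutation_hint str1 str2 out) := by unfold Spec_isPermutation_hint; infer_instance

-- ===== CLAIM (what is proved, stated in full; the proofs are below) =====
def Claim_equal_isPermutation_hint : Prop := ∀ (str1 : String) (str2 : String), Dom_isPermutation_hint str1 str2 → Spec_isPermutation_hint str1 str2 (isPermutation_hint str1 str2)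

-- ===== LEMMAS AND PROOFS =====

-- If str2's lowered counts all fit under the dict's counts, the minus-loop succeeds; its result is known exactly.
lemma pyMinusLoop_some (l : List Char) (d : PySem.Dict Char Int)
    (h : ∀ c, ((l.map PySem.Chars.lowerChar).count c : Int) ≤ d.getD c 0) :
    ∃ d', pyMinusLoop l d = some d' ∧
      (∀ c, d'.getD c 0 = d.getD c 0 - (l.map PySem.Chars.lowerChar).count c) ∧
      d'.keys = d.keys := by
  induction l generalizing d with
  | nil => exact ⟨d, rfl, by simp, rfl⟩
  | cons c rest ih =>
      have hc := h (PySem.Chars.lowerChar c)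
      simp at hc
      have hpos : (1 : Int) ≤ d.getD (PySem.Chars.lowerChar c) 0 := by omega
      have hcontains : d.contains (PySem.Chars.lowerChar c) = true := by
        by_contra hnc
        have := PySem.Dict.getD_of_not_contains (d := d) (k := PySem.Chars.lowerChar c) (d0 := (0 : Int))
          (by simpa using hnc)
        omega
      obtain ⟨d', hd', hget, hkeys⟩ := ih (d.insert (PySem.Chars.lowerChar c) (d.getD (PySem.Chars.lowerChar c) 0 - 1))
        (by
          intro x
          rw [PySem.Dict.getD_insert]
          by_cases hx : x = PySem.Chars.lowerChar c
          · subst hx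
            rw [if_pos rfl]
            omega
          · rw [if_neg hx]
            have hxc := h x
            simp only [List.map_cons, List.count_cons, beq_iff_eq] at hxc
            rw [if_neg (fun hh => hx hh.symm)] at hxc
            simpa using hxc)
      refine ⟨d', ?_, ?_, ?_⟩
      · simp only [pyMinusLoop]
        rw [if_neg (by omega)]
        exact hd'
      · intro x
        rw [hget x, PySem.Dict.getD_insert]
        by_cases hx : x = PySem.Chars.lowerChar c
        · subst hx
          rw [if_pos rfl]
          simp
          ring
        · rw [if_neg hx]
          simp only [List.map_cons, List.count_cons, beq_iff_eq]
          rw [if_neg (fun hh => hx hh.symm)]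
          push_cast
          ring
      · rw [hkeys, PySem.Dict.keys_insert_of_contains d _ hcontains]

-- If some lowered char of str2 exceeds its dict count, the minus-loop returns early ('return False').
lemma pyMinusLoop_none (l : List Char) (d : PySem.Dict Char Int)
    (hnn : ∀ c, 0 ≤ d.getD c 0)
    (h : ∃ c, d.getD c 0 < ((l.map PySem.Chars.lowerChar).count c : Int)) :
    pyMinusLoop l d = none := by
  induction l generalizing d with
  | nil =>
      obtain ⟨c, hc⟩ := h
      have := hnn c
      simp at hc
      omega
  | cons c rest ih =>
      simp only [pyMinusLoop]
      by_cases hneg : d.getD (PySem.Chars.lowerChar c) 0 - 1 < 0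
      · rw [if_pos hneg]
      · rw [if_neg hneg]
        apply ih
        · intro x
          rw [PySem.Dict.getD_insert]
          by_cases hxc : x = PySem.Chars.lowerChar c
          · rw [if_pos hxc]; omega
          · rw [if_neg hxc]; exact hnn x
        obtain ⟨x, hx⟩ := h
        refine ⟨x, ?_⟩
        rw [PySem.Dict.getD_insert]
        by_cases hxc : x = PySem.Chars.lowerChar c
        · subst hxc
          rw [if_pos rfl]
          simp at hx
          push_cast at hx ⊢
          omega
        · rw [if_neg hxc]
          simp only [List.map_cons, List.count_cons, beq_iff_eq] at hx
          rw [if_neg (fun hh => hxc hh.symm)] at hx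
          simpa using hx

-- A computes exactly 'the lowered character multisets are equal'.
lemma isPermutation_hint_eq_decide_perm (str1 str2 : String) :
    isPermutation_hint str1 str2
      = decide ((str1.toList.map PySem.Chars.lowerChar).Perm (str2.toList.map PySem.Chars.lowerChar)) := by
  set L1 := str1.toList.map PySem.Chars.lowerChar with hL1
  set L2 := str2.toList.map PySem.Chars.lowerChar with hL2
  unfold isPermutation_hint
  by_cases hlen : PySem.Str.len str1 = PySem.Str.len str2
  · rw [if_neg (by simpa using hlen)]
    have hfold : str1.toList.foldl
        (fun d c => d.insert (PySem.Chars.lowerChar c) (d.getD (PySem.Chars.lowerChar c) 0 + 1))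
        (PySem.Dict.empty : PySem.Dict Char Int)
      = L1.foldl (fun d x => d.insert x (d.getD x 0 + 1)) PySem.Dict.empty := by
      rw [hL1, List.foldl_map]
    rw [hfold]
    have hget : ∀ c, (L1.foldl (fun d x => d.insert x (d.getD x 0 + 1))
        (PySem.Dict.empty : PySem.Dict Char Int)).getD c 0 = (L1.count c : Int) := by
      intro c
      rw [PySem.Dict.getD_foldl_insert_add_one]
      simp
    have hkeys : (L1.foldl (fun d x => d.insert x (d.getD x 0 + 1))
        (PySem.Dict.empty : PySem.Dict Char Int)).keys = PySem.Set.ofList L1 := by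
      rw [PySem.Dict.keys_foldl_insert]
      rfl
    by_cases hexc : ∃ c, (L1.count c : Int) < (L2.count c : Int)
    · -- some char of str2 has too many occurrences: A returns False early, and no permutation
      have hnone : pyMinusLoop str2.toList (L1.foldl (fun d x => d.insert x (d.getD x 0 + 1))
          (PySem.Dict.empty : PySem.Dict Char Int)) = none := by
        apply pyMinusLoop_none
        · intro c; rw [hget c]; positivity
        obtain ⟨c, hc⟩ := hexc
        exact ⟨c, by rw [hget c, ← hL2]; exact hc⟩
      rw [hnone]
      obtain ⟨c, hc⟩ := hexc
      have hnp : ¬ L1.Perm L2 := by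
        intro hp
        rw [List.Perm.count_eq hp c] at hc
        omega
      simp [hnp]
    · push Not at hexc
      obtain ⟨d', hd', hget', hkeys'⟩ := pyMinusLoop_some str2.toList
        (L1.foldl (fun d x => d.insert x (d.getD x 0 + 1)) (PySem.Dict.empty : PySem.Dict Char Int))
        (by intro c; rw [hget c, ← hL2]; exact hexc c)
      rw [hd']
      show d'.items.all (fun kv => kv.2 == 0) = decide (L1.Perm L2)
      -- the third loop over items checks all counts came out zero
      have hnd' : d'.keys.Nodup := by rw [hkeys', hkeys]; exact PySem.Set.nodup_ofList L1
      have hvals : d'.items.all (fun kv => kv.2 == 0)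
          = (PySem.Set.ofList L1).all (fun k => ((L1.count k : Int) - (L2.count k : Int) == 0)) := by
        have hitems : d'.items.all (fun kv => kv.2 == 0) = d'.values.all (fun v => v == 0) := by
          simp only [PySem.Dict.values, List.all_map]
          rfl
        rw [hitems, PySem.Dict.values_eq_map_keys d' hnd' 0, List.all_map, hkeys', hkeys]
        exact List.all_congr rfl (fun k => by
          simp only [Function.comp]
          rw [hget' k, hget k, ← hL2])
      rw [hvals]
      by_cases hperm : L1.Perm L2
      · have hall : ∀ k ∈ PySem.Set.ofList L1, (((L1.count k : Int) - (L2.count k : Int) == 0)) = true := by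
          intro k _
          simp [hperm.count_eq k]
        rw [List.all_eq_true.mpr hall]
        simp [hperm]
      · -- counts are not all equal, so some char of str1 keeps a positive count: third loop returns False
        have hw : ∃ c, (L2.count c : Int) < (L1.count c : Int) := by
          by_contra hno
          push Not at hno
          apply hperm
          rw [List.perm_iff_count]
          intro c
          have h1 := hexc c
          have h2 := hno c
          omega
        obtain ⟨c0, hc0⟩ := hw
        have hmem : c0 ∈ PySem.Set.ofList L1 := by
          rw [PySem.Set.mem_ofList]
          apply List.count_pos_iff.mp
          omega
        have hfalse : (((L1.count c0 : Int) - (L2.count c0 : Int) == 0)) = false := by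
          simp [sub_eq_zero]
          omega
        have hallfalse : (PySem.Set.ofList L1).all (fun k => ((L1.count k : Int) - (L2.count k : Int) == 0)) = false := by
          rw [List.all_eq_false]
          exact ⟨c0, hmem, by simp [hfalse]⟩
        rw [hallfalse]
        simp [hperm]
  · rw [if_pos (by simpa using hlen)]
    have hnp : ¬ L1.Perm L2 := by
      intro hp
      have hlp := hp.length_eq
      simp only [hL1, hL2, List.length_map] at hlp
      simp [PySem.Str.len_eq, hlp] at hlen
    simp [hnp]

-- ===== VERDICT (by name: the statement is the Claim_ definition above) =====
theorem isPermutation_hint_spec : Claim_equal_isPermutation_hint := by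
  intro str1 str2 _
  unfold Spec_isPermutation_hint isPermutation_hint_alt
  rw [isPermutation_hint_eq_decide_perm]
  have h1 : (PySem.Str.lower str1).toList = str1.toList.map PySem.Chars.lowerChar := by
    rw [PySem.Str.toList_lower]; rfl
  have h2 : (PySem.Str.lower str2).toList = str2.toList.map PySem.Chars.lowerChar := by
    rw [PySem.Str.toList_lower]; rfl
  simp only [h1, h2]
  exact (decide_eq_decide.mpr (PySem.List.sorted_id_eq_sorted_id_iff_perm _ _)).symm
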